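-- pv_equiv track=rewrite | github.com/a-marinin/pythonItmo2024 | home_work/home_work_04.py | lesenka
-- ===== SOURCE A (Python) =====
-- def lesenka(cubes_qty, max_layer_width):
--     '''
--     cubes_qty - это общее количество кубиков
--     max_layer_width - это максимально допустимая ширина слоя кубиков (в текущем ряду)
--     count - это количество комбинаций лесенки из кубиков
--     i (в цикле for) - это количество кубиков в текущем слое
--     '''
--     if cubes_qty == 0:  # Если все кубики закончились
--         return 1
--     count = 0  # Сбрасываем значение переменной count до 0 (при каждой итерации)
--     '''
--     В цикле подставляем текущее количества кубиков в слое в диапозоне: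
--     Минимальное значение общего количества кубиков или максимальную допустимую ширину слоя (что быстрее закончится)
--     Уменьшаем до 0 с шагом в -1
--     '''
--     for i in range(min(cubes_qty, max_layer_width), 0, -1):
--         '''
--         Увеличиваем количество комбинаций, повторно вызывая функцию lesenka.
--         В качестве аргументов передаём ей:
--         1. Количество оставшихся не использованных кубиков (общее количество кубиков минус количество кубиков в текущем слое)
--         2. Максимально допустамую ширину слоя минус 1.
--         '''
--         count += lesenka(cubes_qty - i, i - 1)
--
--     return count  # Возвращаем количество комбинаций
-- ===== SOURCE B (Python) =====
-- def lesenka(cubes_qty, max_layer_width):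
--     # Bottom-up DP over "distinct parts up to k": prev[r] = number of ways to
--     # split r cubes into strictly decreasing layers of width <= k.
--     if cubes_qty == 0:
--         return 1
--     if cubes_qty < 0 or max_layer_width <= 0:
--         return 0
--     n = cubes_qty
--     w = min(max_layer_width, n)
--     if 2 * n > w * (w + 1):
--         return 0  # even 1+2+...+w cubes are fewer than n
--     prev = [1] + [0] * n  # k = 0 column
--     for k in range(1, w + 1):
--         prev = [prev[r] + (prev[r - k] if r >= k else 0) for r in range(n + 1)]
--     return prev[n]
-- ===== Notes on version B (the rewrite author's own statement) =====
-- stated objective: faster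
-- what changed: Replaces A's exponential recursion over all strictly-decreasing layer sequences by a bottom-up dynamic-programming table over (remaining cubes, max width), computed column by column with the add-or-skip recurrence for partitions into distinct parts.
import Mathlib
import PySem

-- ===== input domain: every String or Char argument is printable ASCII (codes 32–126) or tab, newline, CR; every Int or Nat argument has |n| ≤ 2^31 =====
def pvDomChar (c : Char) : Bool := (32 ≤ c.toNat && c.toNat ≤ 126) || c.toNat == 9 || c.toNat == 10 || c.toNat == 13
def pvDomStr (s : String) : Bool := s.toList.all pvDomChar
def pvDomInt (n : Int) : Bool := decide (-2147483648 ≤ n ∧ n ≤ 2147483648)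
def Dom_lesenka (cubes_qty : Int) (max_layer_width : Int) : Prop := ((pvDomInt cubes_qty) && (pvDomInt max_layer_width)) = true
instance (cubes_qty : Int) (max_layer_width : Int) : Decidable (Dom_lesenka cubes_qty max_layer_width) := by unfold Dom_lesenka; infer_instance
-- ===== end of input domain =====

-- B replaces A's exponential recursion over all strictly decreasing layer sequences by a
-- bottom-up DP over "r cubes with layer widths ≤ k" (objective: faster, asymptotic).

-- ===== PORT A =====
-- literal port of A: recursion over the countdown range, summing recursive calls
def lesenka (cubes_qty : Int) (max_layer_width : Int) : Int :=
  if cubes_qty = 0 then 1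
  else
    (PySem.List.pyRange (min cubes_qty max_layer_width) 0 (-1)).attach.foldl
      (fun count p => count + lesenka (cubes_qty - p.1) (p.1 - 1)) 0
termination_by cubes_qty.toNat
decreasing_by
  have h := (PySem.List.mem_pyRange_neg_one).mp p.2
  have hle : min cubes_qty max_layer_width ≤ cubes_qty := min_le_left _ _
  omega

-- ===== PORT B =====
-- literal port of Source B: the k-th pass turns column k-1 of the DP table into column k
def lesenka_alt (cubes_qty : Int) (max_layer_width : Int) : Int :=
  if cubes_qty = 0 then 1
  else if cubes_qty < 0 ∨ max_layer_width ≤ 0 then 0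
  else if 2 * cubes_qty > (min max_layer_width cubes_qty) * ((min max_layer_width cubes_qty) + 1)
    then 0  -- even 1+2+...+w cubes are fewer than cubes_qty
  else
    let n := cubes_qty.toNat
    let w := (min max_layer_width cubes_qty).toNat
    let last := (List.range' 1 w).foldl
      (fun prev k => (List.range (n+1)).map
        (fun r => prev.getD r 0 + if k ≤ r then prev.getD (r - k) 0 else 0))
      (1 :: List.replicate n 0)
    last.getD n 0

-- ===== PRECONDITION & SPEC =====
def Spec_lesenka (cubes_qty : Int) (max_layer_width : Int) (out : Int) : Prop := out = lesenka_alt cubes_qty max_layer_width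
instance (cubes_qty : Int) (max_layer_width : Int) (out : Int) : Decidable (Spec_lesenka cubes_qty max_layer_width out) := by unfold Spec_lesenka; infer_instance

-- ===== CLAIM (what is proved, stated in full; the proofs are below) =====
def Claim_equal_lesenka : Prop := ∀ (cubes_qty : Int) (max_layer_width : Int), Dom_lesenka cubes_qty max_layer_width → Spec_lesenka cubes_qty max_layer_width (lesenka cubes_qty max_layer_width)

-- ===== LEMMAS AND PROOFS =====

-- mathematical reference: pvG r k = number of ways to split r cubes into strictly
-- decreasing layers of width ≤ k
def pvG : Nat → Nat → Int
  | 0, _ => 1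
  | r+1, k => ((List.range (min (r+1) k)).attach.map (fun j => pvG (r - j.1) j.1)).sum
termination_by r _ => r
decreasing_by
  have := j.2
  simp [List.mem_range] at this
  omega

theorem pvG_succ (r k : Nat) :
    pvG (r+1) k = ((List.range (min (r+1) k)).map (fun j => pvG (r - j) j)).sum := by
  rw [pvG]
  congr 1
  simp

theorem pvG_zero_right (r : Nat) (h : 0 < r) : pvG r 0 = 0 := by
  cases r with
  | zero => omega
  | succ s => simp [pvG_succ]

-- more cubes than 1+2+...+k can hold: no layering exists
theorem pvG_big (r k : Nat) (h : k*(k+1) < 2*r) : pvG r k = 0 := by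
  cases r with
  | zero => omega
  | succ s =>
    rw [pvG_succ]
    have hz : ∀ j ∈ List.range (min (s+1) k), pvG (s - j) j = 0 := by
      intro j hj
      rw [List.mem_range] at hj
      have hb : (j+1)*(j+2) ≤ k*(k+1) := Nat.mul_le_mul (by omega) (by omega)
      have hab : (j+1)*(j+2) = j*(j+1) + 2*(j+1) := by ring
      exact pvG_big (s - j) j (by omega)
    rw [List.map_congr_left hz]
    simp
termination_by r
decreasing_by omega

theorem pvG_min (r k : Nat) : pvG r (min r k) = pvG r k := by
  cases r with
  | zero => simp [pvG]
  | succ s => rw [pvG_succ, pvG_succ, ← min_assoc, min_self]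

-- the Pascal-style recurrence the DP column pass implements
theorem pvG_pascal (r k : Nat) :
    pvG r (k+1) = pvG r k + (if k+1 ≤ r then pvG (r-(k+1)) k else 0) := by
  cases r with
  | zero => simp [pvG]
  | succ s =>
    by_cases h : k + 1 ≤ s + 1
    · have h1 : min (s+1) (k+1) = k+1 := by omega
      have h2 : min (s+1) k = k := by omega
      rw [pvG_succ, pvG_succ, h1, h2, List.range_succ, List.map_append, List.sum_append]
      simp only [List.map_cons, List.map_nil, List.sum_cons, List.sum_nil, if_pos h]
      have : s + 1 - (k+1) = s - k := by omega
      rw [this]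
      ring
    · have h1 : min (s+1) (k+1) = s+1 := by omega
      have h2 : min (s+1) k = s+1 := by omega
      rw [pvG_succ, pvG_succ, h1, h2, if_neg h]
      ring

-- foldl of additions over an attach-list is the sum of the mapped list
theorem pvFoldl_add (l : List Int) (acc : Int) : l.foldl (· + ·) acc = acc + l.sum := by
  induction l generalizing acc with
  | nil => simp
  | cons x xs ih => rw [List.foldl_cons, ih, List.sum_cons]; ring

theorem pvFoldl_add_attach (l : List Int) (f : Int → Int) (acc : Int) :
    (l.attach.foldl (fun count p => count + f p.1) acc) = acc + (l.map f).sum := by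
  rw [List.foldl_attach (l := l) (f := fun count x => count + f x) (b := acc),
    ← List.foldl_map, pvFoldl_add]

-- descending sum over pyRange a 0 (-1) equals ascending sum over range a.toNat,
-- when the terms agree (F i = G (i-1) for 1 ≤ i ≤ a)
theorem pvSum_desc (a : Int) (F : Int → Int) (G : Nat → Int)
    (h : ∀ i : Int, 1 ≤ i → i ≤ a → F i = G (i-1).toNat) :
    ((PySem.List.pyRange a 0 (-1)).map F).sum = ((List.range a.toNat).map G).sum := by
  by_cases ha : a ≤ 0
  · rw [PySem.List.pyRange_neg_one_eq_nil ha]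
    have : a.toNat = 0 := by omega
    simp [this]
  · rw [PySem.List.pyRange_neg_one_cons (by omega)]
    have hna : a.toNat = (a-1).toNat + 1 := by omega
    rw [hna, List.range_succ, List.map_cons, List.map_append, List.sum_cons, List.sum_append]
    have hrec := pvSum_desc (a-1) F G (fun i h1 h2 => h i h1 (by omega))
    rw [hrec]
    have hFa : F a = G ((a-1).toNat) := by
      have := h a (by omega) le_rfl
      simpa using this
    simp [hFa]
    ring
termination_by a.toNat
decreasing_by omega

-- A computes pvG (on nonnegative cube counts; for negative counts it returns 0)
theorem pvA_eq (c m : Int) :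
    lesenka c m = if c = 0 then 1 else if c < 0 then 0 else pvG c.toNat (min c m).toNat := by
  rw [lesenka]
  by_cases hc0 : c = 0
  · simp [hc0]
  · rw [if_neg hc0, if_neg hc0]
    by_cases hcneg : c < 0
    · rw [if_pos hcneg]
      have : min c m ≤ 0 := by
        have := min_le_left c m; omega
      rw [PySem.List.pyRange_neg_one_eq_nil this]
      simp
    · rw [if_neg hcneg]
      have hc1 : 1 ≤ c := by omega
      rw [pvFoldl_add_attach (PySem.List.pyRange (min c m) 0 (-1)) (fun i => lesenka (c - i) (i - 1)) 0, zero_add]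
      have hn : c.toNat = (c.toNat - 1) + 1 := by omega
      rw [hn, pvG_succ]
      have hmin : min (c.toNat - 1 + 1) (min c m).toNat = (min c m).toNat := by
        have := min_le_left c m; omega
      rw [hmin]
      apply pvSum_desc
      intro i h1 h2
      have hrec := pvA_eq (c - i) (i - 1)
      have hi_le_c : i ≤ c := le_trans h2 (min_le_left c m)
      by_cases hz : c - i = 0
      · rw [hrec, if_pos hz]
        have : c.toNat - 1 - (i-1).toNat = 0 := by omega
        rw [this, pvG]
      · rw [hrec, if_neg hz, if_neg (by omega)]
        have h3 : (min (c - i) (i - 1)).toNat = min (c-i).toNat (i-1).toNat := by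
          rcases le_total (c-i) (i-1) with h | h
          · rw [min_eq_left h, min_eq_left (by omega)]
          · rw [min_eq_right h, min_eq_right (by omega)]
        rw [h3, pvG_min]
        congr 1
        omega
termination_by c.toNat
decreasing_by omega

-- getD into a mapped range picks the function value
theorem pvGetD_map_range (n r : Nat) (f : Nat → Int) (h : r < n) :
    ((List.range n).map f).getD r 0 = f r := by
  rw [List.getD_eq_getElem?_getD, List.getElem?_map, List.getElem?_range h]
  rfl

-- the DP fold builds column w of the pvG table
theorem pvDP_fold (n : Nat) (w : Nat) :
    (List.range' 1 w).foldl
      (fun prev k => (List.range (n+1)).map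
        (fun r => prev.getD r 0 + if k ≤ r then prev.getD (r - k) 0 else 0))
      (1 :: List.replicate n 0)
    = (List.range (n+1)).map (fun r => pvG r w) := by
  induction w with
  | zero =>
    simp only [List.range'_zero, List.foldl_nil]
    refine List.ext_getElem (by simp) ?_
    intro i h1 h2
    simp only [List.getElem_map, List.getElem_range]
    cases i with
    | zero => simp [pvG]
    | succ j =>
      simp only [List.getElem_cons_succ, List.getElem_replicate]
      rw [pvG_zero_right (j+1) (by omega)]
  | succ v ih =>
    rw [List.range'_1_concat, List.foldl_append, ih, List.foldl_cons, List.foldl_nil]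
    apply List.map_congr_left
    intro r hr
    rw [List.mem_range] at hr
    rw [pvGetD_map_range _ _ _ hr]
    by_cases hk : 1 + v ≤ r
    · rw [if_pos hk, pvGetD_map_range _ _ _ (by omega), pvG_pascal r v]
      have hsub : r - (1 + v) = r - (v + 1) := by omega
      rw [hsub, if_pos (by omega : v + 1 ≤ r)]
    · rw [if_neg hk, pvG_pascal r v, if_neg (by omega : ¬ v + 1 ≤ r)]

-- ===== VERDICT (by name: the statement is the Claim_ definition above) =====
theorem lesenka_spec : Claim_equal_lesenka := by
  intro c m _
  unfold Spec_lesenka lesenka_alt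
  rw [pvA_eq]
  by_cases hc0 : c = 0
  · rw [if_pos hc0, if_pos hc0]
  · rw [if_neg hc0, if_neg hc0]
    by_cases hcneg : c < 0
    · rw [if_pos hcneg, if_pos (Or.inl hcneg)]
    · by_cases hm : m ≤ 0
      · rw [if_neg hcneg, if_pos (Or.inr hm)]
        have h1 : min c m ≤ 0 := le_trans (min_le_right c m) hm
        have h2 : (min c m).toNat = 0 := by omega
        rw [h2, pvG_zero_right _ (by omega)]
      · rw [if_neg hcneg, if_neg (by tauto : ¬(c < 0 ∨ m ≤ 0))]
        have hmm : min m c = min c m := min_comm m c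
        have hW : ((min c m).toNat : Int) = min c m := Int.toNat_of_nonneg (by omega)
        by_cases hbig : 2 * c > (min m c) * ((min m c) + 1)
        · rw [if_pos hbig]
          apply pvG_big
          rw [hmm] at hbig
          have h2 : ((min c m).toNat * ((min c m).toNat + 1) : Int) < 2 * (c.toNat : Int) := by
            push_cast [hW]
            omega
          exact_mod_cast h2
        · rw [if_neg hbig]
          show pvG c.toNat (min c m).toNat =
          ((List.range' 1 ((min m c).toNat)).foldl
            (fun prev k => (List.range (c.toNat+1)).map
              (fun r => prev.getD r 0 + if k ≤ r then prev.getD (r - k) 0 else 0))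
            (1 :: List.replicate c.toNat 0)).getD c.toNat 0
          rw [pvDP_fold, pvGetD_map_range _ _ _ (by omega), min_comm]
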